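-- pv_equiv track=rewrite | github.com/guousuides/syodokai-meihyo | kaisetu.py | calculate_wrap_count
-- ===== SOURCE A (Python) =====
-- LEADING_PROHIBITED_CHARS = {
--     '。', '、', '」', '』', ')', '）', ']', '}'
-- }
--
-- def calculate_wrap_count(text, max_chars):
--     """
--     テキストが何行に折り返されるかを計算します。
--     レイアウト調整時に、行数に応じてX座標を変えるために使用します。
--     """
--     if not text:
--         return 0
--
--     lines = 1
--     char_count = 0
--     text_str = str(text)
--
--     for i, char in enumerate(text_str):
--         if char == '\n':
--             lines += 1
--             char_count = 0
--             continue
--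
--         is_overflow = char_count >= max_chars
--         is_hanging = is_overflow and char in LEADING_PROHIBITED_CHARS
--
--         if is_overflow and not is_hanging:
--             lines += 1
--             char_count = 0
--
--         if is_hanging:
--             if i < len(text_str) - 1:
--                 lines += 1
--                 char_count = 0
--         else:
--             char_count += 1
--
--     return lines - 1
-- ===== SOURCE B (Python) =====
-- LEADING_PROHIBITED_CHARS = {
--     '。', '、', '」', '』', ')', '）', ']', '}'
-- }
--
-- def _segment_wraps(seg, max_chars, is_final):
--     # wrap count for one newline-free segment; char_count restarts at 0.
--     wraps = 0
--     count = 0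
--     n = len(seg)
--     for k, ch in enumerate(seg):
--         if count >= max_chars:
--             if ch in LEADING_PROHIBITED_CHARS:
--                 if not (is_final and k == n - 1):
--                     wraps += 1
--                     count = 0
--                 # the hanging char itself is not counted
--             else:
--                 wraps += 1
--                 count = 1
--         else:
--             count += 1
--     return wraps
--
-- def calculate_wrap_count(text, max_chars):
--     if not text:
--         return 0
--     segments = str(text).split('\n')
--     total = 0
--     for seg in segments[:-1]:
--         total += 1 + _segment_wraps(seg, max_chars, False)
--     return total + _segment_wraps(segments[-1], max_chars, True)
-- ===== Notes on version B (the rewrite author's own statement) =====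
-- stated objective: alternative
-- what changed: A counts lines in one per-character indexed scan over the whole text with a global last-character check; B instead splits the text on ' ' and sums a per-segment wrap counter, the newline count folded in as 1 per non-final segment and the last-character exception becoming a flag on the final segment.
import Mathlib
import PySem

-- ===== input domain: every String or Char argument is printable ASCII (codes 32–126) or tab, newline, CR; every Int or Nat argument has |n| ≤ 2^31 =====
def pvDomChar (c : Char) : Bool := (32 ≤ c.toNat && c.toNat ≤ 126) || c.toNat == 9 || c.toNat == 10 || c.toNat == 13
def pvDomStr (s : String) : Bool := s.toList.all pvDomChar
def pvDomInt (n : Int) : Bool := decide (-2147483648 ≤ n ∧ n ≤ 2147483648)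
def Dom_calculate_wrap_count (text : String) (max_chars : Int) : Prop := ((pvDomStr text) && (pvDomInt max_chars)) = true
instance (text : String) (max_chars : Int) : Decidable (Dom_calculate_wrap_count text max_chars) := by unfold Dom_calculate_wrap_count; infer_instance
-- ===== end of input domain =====

-- B re-decomposes A's single indexed scan into newline-splitting plus a per-segment wrap
-- counter (objective: alternative decomposition, same cost); return values proved equal.

-- ===== PORT A =====
-- membership in LEADING_PROHIBITED_CHARS
def pvProhibited (c : Char) : Bool :=
  c = '。' || c = '、' || c = '」' || c = '』' || c = ')' || c = '）' || c = ']' || c = '}'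

-- the 'for i, char in enumerate(text_str)' loop of A; L = len(text_str)
def pvALoop (mc L : Int) : List Char → Int → Int → Int → Int
  | [], _, lines, _ => lines
  | c :: rest, i, lines, cnt =>
    if c = '\n' then pvALoop mc L rest (i + 1) (lines + 1) 0
    else
      let isOverflow := decide (cnt ≥ mc)
      let isHanging := isOverflow && pvProhibited c
      let lines' := if isOverflow && !isHanging then lines + 1 else lines
      let cnt' := if isOverflow && !isHanging then 0 else cnt
      if isHanging then
        if i < L - 1 then pvALoop mc L rest (i + 1) (lines' + 1) 0
        else pvALoop mc L rest (i + 1) lines' cnt'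
      else pvALoop mc L rest (i + 1) lines' (cnt' + 1)

def calculate_wrap_count (text : String) (max_chars : Int) : Int :=
  if text = "" then 0
  else pvALoop max_chars (text.toList.length : Int) text.toList 0 1 0 - 1

-- ===== PORT B =====
-- B's _segment_wraps: wrap count of one newline-free segment (state: count, wraps)
def pvSegWraps (mc : Int) (isFinal : Bool) : List Char → Int → Int → Int
  | [], _, wraps => wraps
  | c :: rest, count, wraps =>
    if count ≥ mc then
      if pvProhibited c then
        if isFinal && rest.isEmpty then pvSegWraps mc isFinal rest count wraps
        else pvSegWraps mc isFinal rest 0 (wraps + 1)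
      else pvSegWraps mc isFinal rest 1 (wraps + 1)
    else pvSegWraps mc isFinal rest (count + 1) wraps

-- B's main loop: 1 + wraps for every segment before the last, wraps (is_final=True) for the last
def pvBSegs (mc : Int) : List (List Char) → Int
  | [] => 0
  | [seg] => pvSegWraps mc true seg 0 0
  | seg :: rest => 1 + pvSegWraps mc false seg 0 0 + pvBSegs mc rest

def calculate_wrap_count_alt (text : String) (max_chars : Int) : Int :=
  if text = "" then 0
  else pvBSegs max_chars (PySem.Chars.splitOn text.toList ['\n'])

-- ===== PRECONDITION & SPEC =====
def Spec_calculate_wrap_count (text : String) (max_chars : Int) (out : Int) : Prop := out = calculate_wrap_count_alt text max_chars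
instance (text : String) (max_chars : Int) (out : Int) : Decidable (Spec_calculate_wrap_count text max_chars out) := by unfold Spec_calculate_wrap_count; infer_instance

-- ===== CLAIM (what is proved, stated in full; the proofs are below) =====
def Claim_equal_calculate_wrap_count : Prop := ∀ (text : String) (max_chars : Int), Dom_calculate_wrap_count text max_chars → Spec_calculate_wrap_count text max_chars (calculate_wrap_count text max_chars)

-- ===== LEMMAS AND PROOFS =====

-- reference function: number of line advances of the remaining suffix, given the current count
def pvF (mc : Int) : List Char → Int → Int
  | [], _ => 0
  | c :: rest, cnt =>
    if c = '\n' then 1 + pvF mc rest 0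
    else if cnt ≥ mc then
      if pvProhibited c then (if rest.isEmpty then pvF mc rest cnt else 1 + pvF mc rest 0)
      else 1 + pvF mc rest 1
    else pvF mc rest (cnt + 1)

-- simple recursive split on '\n'
def pvSplit : List Char → List (List Char)
  | [] => [[]]
  | c :: rest =>
    if c = '\n' then [] :: pvSplit rest
    else match pvSplit rest with
      | [] => [[c]]
      | s :: ss => (c :: s) :: ss

theorem pvSplit_ne_nil (cs : List Char) : pvSplit cs ≠ [] := by
  cases cs with
  | nil => simp [pvSplit]
  | cons c rest =>
    simp only [pvSplit]
    split
    · simp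
    · cases h : pvSplit rest <;> simp

theorem pvSplit_singleton (cs : List Char) (s : List Char) (h : pvSplit cs = [s]) :
    s = cs ∧ '\n' ∉ cs := by
  induction cs generalizing s with
  | nil => simp [pvSplit] at h; simp [h]
  | cons c rest ih =>
    by_cases hc : c = '\n'
    · simp only [pvSplit, if_pos hc] at h
      obtain ⟨-, h2⟩ := List.cons.inj h
      exact (pvSplit_ne_nil rest h2).elim
    · simp only [pvSplit, if_neg hc] at h
      cases hr : pvSplit rest with
      | nil => exact absurd hr (pvSplit_ne_nil rest)
      | cons s' ss =>
        rw [hr] at h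
        cases ss with
        | nil =>
          obtain ⟨hs', hn⟩ := ih s' hr
          obtain ⟨h1, -⟩ := List.cons.inj h
          subst hs'
          refine ⟨h1.symm ▸ rfl, ?_⟩
          simp [Ne.symm hc, hn]
        | cons a b => simp at h

-- splitOn.go with separator ['\n'] computes pvSplit
theorem pvGo_eq (cs : List Char) : ∀ (fuel : Nat) (cur : List Char) (acc : List (List Char)),
    cs.length < fuel →
    PySem.Chars.splitOn.go ['\n'] fuel cs cur acc =
      acc.reverse ++ (match pvSplit cs with
        | [] => [cur.reverse]
        | s :: ss => (cur.reverse ++ s) :: ss) := by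
  induction cs with
  | nil =>
    intro fuel cur acc hf
    cases fuel with
    | zero => omega
    | succ f => simp [PySem.Chars.splitOn.go, pvSplit]
  | cons c rest ih =>
    intro fuel cur acc hf
    cases fuel with
    | zero => simp at hf
    | succ f =>
      by_cases hc : c = '\n'
      · subst hc
        have : PySem.Chars.splitOn.go ['\n'] (f+1) ('\n' :: rest) cur acc =
            PySem.Chars.splitOn.go ['\n'] f rest [] (cur.reverse :: acc) := by
          simp [PySem.Chars.splitOn.go, List.isPrefixOf]
        rw [this, ih f [] (cur.reverse :: acc) (by simpa using hf)]
        simp only [pvSplit]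
        cases hr : pvSplit rest with
        | nil => exact absurd hr (pvSplit_ne_nil rest)
        | cons s ss => simp
      · have : PySem.Chars.splitOn.go ['\n'] (f+1) (c :: rest) cur acc =
            PySem.Chars.splitOn.go ['\n'] f rest (c :: cur) acc := by
          simp [PySem.Chars.splitOn.go, List.isPrefixOf, Ne.symm hc]
        rw [this, ih f (c :: cur) acc (by simpa using hf)]
        simp only [pvSplit, if_neg hc]
        cases hr : pvSplit rest with
        | nil => exact absurd hr (pvSplit_ne_nil rest)
        | cons s ss => simp

theorem pvSplitOn_eq (cs : List Char) : PySem.Chars.splitOn cs ['\n'] = pvSplit cs := by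
  unfold PySem.Chars.splitOn
  rw [pvGo_eq cs (cs.length + 1) [] [] (by omega)]
  cases hr : pvSplit cs with
  | nil => exact absurd hr (pvSplit_ne_nil cs)
  | cons s ss => simp

-- A's loop computes lines + pvF
theorem pvALoop_eq (mc L : Int) (cs : List Char) : ∀ (i lines cnt : Int),
    i + cs.length = L → pvALoop mc L cs i lines cnt = lines + pvF mc cs cnt := by
  induction cs with
  | nil => intro i lines cnt _; simp [pvALoop, pvF]
  | cons c rest ih =>
    intro i lines cnt hL
    simp only [List.length_cons] at hL
    have hrest : (i + 1) + (rest.length : Int) = L := by push_cast at hL ⊢; omega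
    by_cases hc : c = '\n'
    · simp only [pvALoop, pvF, if_pos hc]
      rw [ih _ _ _ hrest]; ring
    · simp only [pvALoop, pvF, if_neg hc]
      by_cases hov : cnt ≥ mc
      · by_cases hp : pvProhibited c = true
        · -- hanging
          have hi : (i < L - 1) ↔ rest ≠ [] := by
            cases rest with
            | nil => simp at hrest ⊢; omega
            | cons a b =>
              simp only [List.length_cons] at hrest
              constructor
              · intro _ h; cases h
              · intro _; push_cast at hrest; omega
          simp only [decide_eq_true hov, hp, Bool.and_true, Bool.not_true, Bool.and_false,
            if_false, if_true, ge_iff_le, if_pos hov]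
          by_cases hr : rest = []
          · subst hr
            rw [if_neg (by rw [hi]; simp)]
            simp [pvALoop, pvF]
          · have hie : rest.isEmpty = false := by simpa using hr
            rw [if_pos (hi.mpr hr), ih _ _ _ hrest]
            simp only [hie, Bool.false_eq_true, if_false]
            ring
        · -- overflow, not hanging
          have hpb : pvProhibited c = false := by simpa using hp
          simp only [decide_eq_true hov, hpb, Bool.and_false, Bool.not_false, Bool.and_true,
            Bool.false_eq_true, if_false, if_true, ge_iff_le, if_pos hov]
          rw [ih _ _ _ hrest]; ring
      · -- no overflow
        have hd : (decide (cnt ≥ mc)) = false := by simpa using hov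
        simp only [hd, Bool.false_and, Bool.not_false, Bool.false_eq_true, if_false, ge_iff_le]
        rw [if_neg hov, ih _ _ _ hrest]

-- accumulator shift for pvSegWraps
theorem pvSegWraps_shift (mc : Int) (b : Bool) (seg : List Char) : ∀ (cnt w : Int),
    pvSegWraps mc b seg cnt w = w + pvSegWraps mc b seg cnt 0 := by
  induction seg with
  | nil => intro cnt w; simp [pvSegWraps]
  | cons c rest ih =>
    intro cnt w
    simp only [pvSegWraps]
    split_ifs with h1 h2 h3
    · exact ih cnt w
    · rw [ih 0 (w + 1), ih 0 (0 + 1)]; ring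
    · rw [ih 1 (w + 1), ih 1 (0 + 1)]; ring
    · exact ih (cnt + 1) w

-- final segment: pvSegWraps with is_final=True computes pvF on a newline-free list
theorem pvSegWraps_final (mc : Int) (seg : List Char) (h : '\n' ∉ seg) : ∀ (cnt w : Int),
    pvSegWraps mc true seg cnt w = w + pvF mc seg cnt := by
  induction seg with
  | nil => intro cnt w; simp [pvSegWraps, pvF]
  | cons c rest ih =>
    intro cnt w
    have hc : ¬ c = '\n' := fun hh => h (hh ▸ List.mem_cons_self ..)
    have hrest : '\n' ∉ rest := fun hh => h (List.mem_cons_of_mem _ hh)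
    have hrw : pvSegWraps mc true (c :: rest) cnt w =
        if cnt ≥ mc then
          if pvProhibited c then
            if true && rest.isEmpty then pvSegWraps mc true rest cnt w
            else pvSegWraps mc true rest 0 (w + 1)
          else pvSegWraps mc true rest 1 (w + 1)
        else pvSegWraps mc true rest (cnt + 1) w := rfl
    have hfw : pvF mc (c :: rest) cnt =
        if c = '\n' then 1 + pvF mc rest 0
        else if cnt ≥ mc then
          if pvProhibited c then (if rest.isEmpty then pvF mc rest cnt else 1 + pvF mc rest 0)
          else 1 + pvF mc rest 1
        else pvF mc rest (cnt + 1) := rfl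
    rw [hrw, hfw, if_neg hc]
    by_cases h1 : cnt ≥ mc
    · rw [if_pos h1, if_pos h1]
      by_cases h2 : pvProhibited c = true
      · rw [if_pos h2, if_pos h2]
        by_cases h3 : rest.isEmpty = true
        · rw [if_pos (by simp [h3]), if_pos h3, ih hrest]
        · rw [if_neg (by simp [h3]), if_neg h3]
          have := ih hrest 0 (w + 1); linarith
      · rw [if_neg h2, if_neg h2]
        have := ih hrest 1 (w + 1); linarith
    · rw [if_neg h1, if_neg h1]; exact ih hrest (cnt + 1) w

-- generalized B sum: the head segment starts at cnt, the rest at 0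
def pvBSegsAux (mc cnt : Int) : List (List Char) → Int
  | [] => 0
  | [seg] => pvSegWraps mc true seg cnt 0
  | seg :: rest => 1 + pvSegWraps mc false seg cnt 0 + pvBSegsAux mc 0 rest

theorem pvBSegsAux_eq (mc : Int) (cs : List Char) : ∀ (cnt : Int),
    pvBSegsAux mc cnt (pvSplit cs) = pvF mc cs cnt := by
  induction cs with
  | nil => intro cnt; simp [pvSplit, pvBSegsAux, pvSegWraps, pvF]
  | cons c rest ih =>
    intro cnt
    by_cases hc : c = '\n'
    · cases hr : pvSplit rest with
      | nil => exact (pvSplit_ne_nil rest hr).elim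
      | cons s ss =>
        have e1 : pvSplit (c :: rest) = [] :: s :: ss := by simp [pvSplit, hc, hr]
        have e2 : pvBSegsAux mc cnt ([] :: s :: ss) =
            1 + pvSegWraps mc false [] cnt 0 + pvBSegsAux mc 0 (s :: ss) := rfl
        have e3 : pvF mc (c :: rest) cnt = 1 + pvF mc rest 0 := by
          subst hc; rfl
        rw [e1, e2, e3, ← hr, ih 0]
        simp [pvSegWraps]
    · cases hr : pvSplit rest with
      | nil => exact (pvSplit_ne_nil rest hr).elim
      | cons s ss =>
        cases ss with
        | nil =>
          obtain ⟨hs, hn⟩ := pvSplit_singleton rest s hr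
          have e1 : pvSplit (c :: rest) = [c :: rest] := by simp [pvSplit, if_neg hc, hr, hs]
          have hnocr : '\n' ∉ c :: rest := by
            intro hm; rcases List.mem_cons.mp hm with h1 | h2
            · exact hc h1.symm
            · exact hn h2
          rw [e1]
          have e2 : pvBSegsAux mc cnt [c :: rest] = pvSegWraps mc true (c :: rest) cnt 0 := rfl
          rw [e2, pvSegWraps_final mc _ hnocr cnt 0]; ring
        | cons a b =>
          have hrne : rest ≠ [] := by
            intro hh; subst hh; simp [pvSplit] at hr
          have key : ∀ cnt', 1 + pvSegWraps mc false s cnt' 0 + pvBSegsAux mc 0 (a :: b) = pvF mc rest cnt' := by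
            intro cnt'
            have h5 := ih cnt'
            rw [hr] at h5
            exact h5
          have e1 : pvSplit (c :: rest) = (c :: s) :: a :: b := by simp [pvSplit, if_neg hc, hr]
          have e2 : pvBSegsAux mc cnt ((c :: s) :: a :: b) =
              1 + pvSegWraps mc false (c :: s) cnt 0 + pvBSegsAux mc 0 (a :: b) := rfl
          have hsw : pvSegWraps mc false (c :: s) cnt 0 =
              if cnt ≥ mc then
                if pvProhibited c then
                  if false && s.isEmpty then pvSegWraps mc false s cnt 0
                  else pvSegWraps mc false s 0 (0 + 1)
                else pvSegWraps mc false s 1 (0 + 1)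
              else pvSegWraps mc false s (cnt + 1) 0 := rfl
          have hfv : pvF mc (c :: rest) cnt =
              if c = '\n' then 1 + pvF mc rest 0
              else if cnt ≥ mc then
                if pvProhibited c then (if rest.isEmpty then pvF mc rest cnt else 1 + pvF mc rest 0)
                else 1 + pvF mc rest 1
              else pvF mc rest (cnt + 1) := rfl
          have hie : rest.isEmpty = false := by simpa using hrne
          rw [e1, e2, hsw, hfv, if_neg hc, hie]
          by_cases hb1 : cnt ≥ mc
          · rw [if_pos hb1, if_pos hb1]
            by_cases hb2 : pvProhibited c = true
            · rw [if_pos hb2, if_pos hb2, if_neg (by simp : ¬(false && s.isEmpty) = true),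
                if_neg (by simp : ¬false = true)]
              have := pvSegWraps_shift mc false s 0 (0 + 1)
              have := key 0
              linarith
            · rw [if_neg hb2, if_neg hb2]
              have := pvSegWraps_shift mc false s 1 (0 + 1)
              have := key 1
              linarith
          · rw [if_neg hb1, if_neg hb1]; exact key (cnt + 1)

theorem pvBSegs_eq_aux (mc : Int) (segs : List (List Char)) : pvBSegs mc segs = pvBSegsAux mc 0 segs := by
  induction segs with
  | nil => rfl
  | cons s ss ih =>
    cases ss with
    | nil => rfl
    | cons a b => simp only [pvBSegs, pvBSegsAux]; rw [ih]

-- ===== VERDICT (by name: the statement is the Claim_ definition above) =====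
theorem calculate_wrap_count_spec : Claim_equal_calculate_wrap_count := by
  intro text mc _
  unfold Spec_calculate_wrap_count calculate_wrap_count calculate_wrap_count_alt
  by_cases ht : text = ""
  · simp [ht]
  · rw [if_neg ht, if_neg ht, pvSplitOn_eq, pvBSegs_eq_aux, pvBSegsAux_eq,
      pvALoop_eq mc _ text.toList 0 1 0 (by simp)]
    ring
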